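-- pv_equiv track=rewrite | github.com/justjacobrosario/BS_Computer_Science_UPD_Repo | 1st Year 1st Sem/python test drive/lec19_algorithms/scratch.py | max_activity_happiness
-- ===== SOURCE A (Python) =====
-- def max_activity_happiness(G, S, R):
--
--     # _init_
--     states = [0, 0, 0]
--
--     for day in range(len(G)):
--         upd = [0, 0, 0]
--         upd[0] = max(states[1], states[2]) + G[day]
--         upd[1] = max(states) + S[day]
--         upd[2] = max(states) + R[day]
--
--         states = upd
--     return max(states)
-- ===== SOURCE B (Python) =====
-- def _add(a, b):
--     return None if a is None or b is None else a + b
--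
--
-- def _max(a, b):
--     if a is None:
--         return b
--     if b is None:
--         return a
--     return a if a >= b else b
--
--
-- def _mul(x, y):
--     a, b, c, d = x
--     e, f, g, h = y
--     return (_max(_add(a, e), _add(b, g)), _max(_add(a, f), _add(b, h)),
--             _max(_add(c, e), _add(d, g)), _max(_add(c, f), _add(d, h)))
--
--
-- def _prod(mats, lo, hi):
--     # (max,+) product of mats[lo:hi], hi - lo >= 1; balanced divide and conquer
--     if hi - lo == 1:
--         return mats[lo]
--     mid = (lo + hi) // 2
--     return _mul(_prod(mats, lo, mid), _prod(mats, mid, hi))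
--
--
-- def max_activity_happiness(G, S, R):
--     # Divide-and-conquer product of per-day (max,+) 2x2 transfer matrices.
--     # State 0: today was gym; state 1: today was not gym.  Entry m[p][q] is the
--     # happiness gained today when yesterday's state was p and today's is q;
--     # None (= -infinity) forbids gym right after gym.
--     if not G:
--         return 0
--     mats = []
--     for d in range(len(G)):
--         sr = max(S[d], R[d])
--         mats.append((None, sr, G[d], sr))
--     p = _prod(mats, 0, len(G))
--     # start in state 1 (no gym yesterday), end anywhere
--     return _max(p[2], p[3])
-- ===== Notes on version B (the rewrite author's own statement) =====
-- stated objective: alternative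
-- what changed: Replaces the forward 3-state DP loop with a balanced divide-and-conquer product of per-day (max,+) 2x2 transfer matrices (None = -infinity forbids gym after gym), reading the answer off the bottom row of the product.
import Mathlib
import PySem

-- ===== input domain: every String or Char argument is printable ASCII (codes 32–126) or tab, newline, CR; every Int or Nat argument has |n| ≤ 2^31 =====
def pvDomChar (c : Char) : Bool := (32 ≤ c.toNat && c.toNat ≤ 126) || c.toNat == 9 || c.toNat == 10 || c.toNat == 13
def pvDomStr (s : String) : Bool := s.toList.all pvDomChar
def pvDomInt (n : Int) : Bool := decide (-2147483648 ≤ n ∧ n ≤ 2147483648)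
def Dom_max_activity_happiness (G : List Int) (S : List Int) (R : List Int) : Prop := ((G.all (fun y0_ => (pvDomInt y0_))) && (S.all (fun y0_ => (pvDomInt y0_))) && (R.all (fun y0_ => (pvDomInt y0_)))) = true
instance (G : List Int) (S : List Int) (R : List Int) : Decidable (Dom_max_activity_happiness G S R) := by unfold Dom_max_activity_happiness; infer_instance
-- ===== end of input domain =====

-- B replaces A's forward 3-state DP loop by a balanced divide-and-conquer product of
-- per-day (max,+) 2x2 transfer matrices (none = -infinity forbids gym after gym);
-- an alternative algorithm of the same O(n) cost.

-- ===== PORT A =====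
-- pyGetD is exact for G[day]/S[day]/R[day] here: Pre_ puts every index of the range in bounds.
def max_activity_happiness (G : List Int) (S : List Int) (R : List Int) : Int :=
  let states : Int × Int × Int := (0, 0, 0)
  let states := (PySem.List.pyRange 0 (G.length : Int) 1).foldl
    (fun (st : Int × Int × Int) day =>
      (max st.2.1 st.2.2 + PySem.List.pyGetD G day 0,
       max st.1 (max st.2.1 st.2.2) + PySem.List.pyGetD S day 0,
       max st.1 (max st.2.1 st.2.2) + PySem.List.pyGetD R day 0)) states
  max states.1 (max states.2.1 states.2.2)

-- ===== PORT B =====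
-- Source B's _add: None is absorbing (-infinity)
def pvAddO (a b : Option Int) : Option Int :=
  match a, b with
  | some x, some y => some (x + y)
  | _, _ => none

-- Source B's _max: None is the identity
def pvMaxO (a b : Option Int) : Option Int :=
  match a, b with
  | none, b => b
  | a, none => a
  | some x, some y => some (max x y)

-- (m00, m01, m10, m11)
def pvMatMul (x y : Option Int × Option Int × Option Int × Option Int) :
    Option Int × Option Int × Option Int × Option Int :=
  (pvMaxO (pvAddO x.1 y.1) (pvAddO x.2.1 y.2.2.1),
   pvMaxO (pvAddO x.1 y.2.1) (pvAddO x.2.1 y.2.2.2),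
   pvMaxO (pvAddO x.2.2.1 y.1) (pvAddO x.2.2.2 y.2.2.1),
   pvMaxO (pvAddO x.2.2.1 y.2.1) (pvAddO x.2.2.2 y.2.2.2))

-- Source B's _prod: product of mats[lo:hi], hi - lo >= 1 at every call; the guard
-- 'hi ≤ lo + 1' only totalizes the same computation (Python tests hi - lo == 1).
-- Source B's _prod: product of mats[lo:hi], hi - lo >= 1 at every call.  The fuel
-- argument (callers pass hi - lo) and the 'hi ≤ lo + 1' guard only totalize the
-- same computation (Python tests hi - lo == 1).
def pvProdSeg (mats : List (Option Int × Option Int × Option Int × Option Int)) :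
    Nat → Nat → Nat → Option Int × Option Int × Option Int × Option Int
  | 0, lo, _ => PySem.List.pyGetD mats (lo : Int) (none, none, none, none)
  | fuel + 1, lo, hi =>
    if hi ≤ lo + 1 then PySem.List.pyGetD mats (lo : Int) (none, none, none, none)
    else pvMatMul (pvProdSeg mats fuel lo ((lo + hi) / 2))
      (pvProdSeg mats fuel ((lo + hi) / 2) hi)

def max_activity_happiness_alt (G : List Int) (S : List Int) (R : List Int) : Int :=
  if G = [] then 0
  else
    let mats := (PySem.List.pyRange 0 (G.length : Int) 1).map (fun d =>
      let sr := max (PySem.List.pyGetD S d 0) (PySem.List.pyGetD R d 0)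
      ((none : Option Int), some sr, some (PySem.List.pyGetD G d 0), some sr))
    let p := pvProdSeg mats G.length 0 G.length
    -- the m11 chain is all-finite, so Python's _max(p[2], p[3]) is an int here
    (pvMaxO p.2.2.1 p.2.2.2).getD 0

-- ===== PRECONDITION & SPEC =====
-- Pre_ excludes exactly the inputs on which A raises IndexError: S or R shorter than G.
def Pre_max_activity_happiness (G : List Int) (S : List Int) (R : List Int) : Prop :=
  G.length ≤ S.length ∧ G.length ≤ R.length
instance (G : List Int) (S : List Int) (R : List Int) : Decidable (Pre_max_activity_happiness G S R) := by unfold Pre_max_activity_happiness; infer_instance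

def pvWitness_max_activity_happiness : List Int × List Int × List Int :=
  ([10, 40, 70], [20, 70, 10], [30, 50, 60])

def Spec_max_activity_happiness (G : List Int) (S : List Int) (R : List Int) (out : Int) : Prop := out = max_activity_happiness_alt G S R
instance (G : List Int) (S : List Int) (R : List Int) (out : Int) : Decidable (Spec_max_activity_happiness G S R out) := by unfold Spec_max_activity_happiness; infer_instance

-- ===== CLAIM (what is proved, stated in full; the proofs are below) =====
def Claim_equal_max_activity_happiness : Prop := ∀ (G : List Int) (S : List Int) (R : List Int), Dom_max_activity_happiness G S R → Pre_max_activity_happiness G S R → Spec_max_activity_happiness G S R (max_activity_happiness G S R)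

-- ===== LEMMAS AND PROOFS =====

-- structural version of A's loop (state pushed forward over the three lists)
def pvFwd : List Int → List Int → List Int → (Int × Int × Int) → (Int × Int × Int)
  | g :: G', s :: S', r :: R', st =>
      pvFwd G' S' R'
        (max st.2.1 st.2.2 + g,
         max st.1 (max st.2.1 st.2.2) + s,
         max st.1 (max st.2.1 st.2.2) + r)
  | _, _, _, st => st

-- structural version of B's per-day transfer matrices
def pvMatList : List Int → List Int → List Int →
    List (Option Int × Option Int × Option Int × Option Int)
  | g :: G', s :: S', r :: R' =>
      (none, some (max s r), some g, some (max s r)) :: pvMatList G' S' R'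
  | _, _, _ => []

-- row vector (v0, v1) times a matrix
def pvRow (v : Option Int × Option Int)
    (m : Option Int × Option Int × Option Int × Option Int) : Option Int × Option Int :=
  (pvMaxO (pvAddO v.1 m.1) (pvAddO v.2 m.2.2.1),
   pvMaxO (pvAddO v.1 m.2.1) (pvAddO v.2 m.2.2.2))

lemma pvFoldA (G S R : List Int) (hS : G.length ≤ S.length) (hR : G.length ≤ R.length) :
    ∀ (n k : Nat) (st : Int × Int × Int), G.length - k ≤ n → k ≤ G.length →
    (PySem.List.pyRange (k : Int) (G.length : Int) 1).foldl
      (fun (st : Int × Int × Int) day =>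
        (max st.2.1 st.2.2 + PySem.List.pyGetD G day 0,
         max st.1 (max st.2.1 st.2.2) + PySem.List.pyGetD S day 0,
         max st.1 (max st.2.1 st.2.2) + PySem.List.pyGetD R day 0)) st
      = pvFwd (G.drop k) (S.drop k) (R.drop k) st := by
  intro n
  induction n with
  | zero =>
      intro k st hn hk
      have hk' : k = G.length := by omega
      rw [PySem.List.pyRange_one_eq_nil (by omega), hk',
        List.drop_eq_nil_of_le (le_refl _)]
      simp [pvFwd]
  | succ m ih =>
      intro k st hn hk
      rcases Nat.eq_or_lt_of_le hk with heq | hlt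
      · rw [heq, PySem.List.pyRange_one_eq_nil (by omega),
          List.drop_eq_nil_of_le (le_refl _)]
        simp [pvFwd]
      · rw [PySem.List.pyRange_one_cons (by exact_mod_cast hlt), List.foldl_cons]
        have h1 : ((k : Int) + 1) = ((k + 1 : Nat) : Int) := by push_cast; ring
        rw [h1, ih (k + 1) _ (by omega) (by omega)]
        rw [List.drop_eq_getElem_cons hlt,
          List.drop_eq_getElem_cons (show k < S.length by omega),
          List.drop_eq_getElem_cons (show k < R.length by omega)]
        simp [pvFwd, PySem.List.pyGetD_natCast, List.getD_eq_getElem?_getD,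
          hlt, show k < S.length by omega,
          show k < R.length by omega]

-- B's range-built matrix list is the structural pvMatList
lemma pvFoldB (G S R : List Int) (hS : G.length ≤ S.length) (hR : G.length ≤ R.length) :
    ∀ (n k : Nat), G.length - k ≤ n → k ≤ G.length →
    (PySem.List.pyRange (k : Int) (G.length : Int) 1).map (fun d =>
      let sr := max (PySem.List.pyGetD S d 0) (PySem.List.pyGetD R d 0)
      ((none : Option Int), some sr, some (PySem.List.pyGetD G d 0), some sr))
      = pvMatList (G.drop k) (S.drop k) (R.drop k) := by
  intro n
  induction n with
  | zero =>
      intro k hn hk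
      have hk' : k = G.length := by omega
      rw [PySem.List.pyRange_one_eq_nil (by omega), hk',
        List.drop_eq_nil_of_le (le_refl _)]
      simp [pvMatList]
  | succ m ih =>
      intro k hn hk
      rcases Nat.eq_or_lt_of_le hk with heq | hlt
      · rw [heq, PySem.List.pyRange_one_eq_nil (by omega),
          List.drop_eq_nil_of_le (le_refl _)]
        simp [pvMatList]
      · rw [PySem.List.pyRange_one_cons (by exact_mod_cast hlt), List.map_cons]
        have h1 : ((k : Int) + 1) = ((k + 1 : Nat) : Int) := by push_cast; ring
        rw [h1, ih (k + 1) (by omega) (by omega)]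
        rw [List.drop_eq_getElem_cons hlt,
          List.drop_eq_getElem_cons (show k < S.length by omega),
          List.drop_eq_getElem_cons (show k < R.length by omega)]
        simp [pvMatList, PySem.List.pyGetD_natCast, List.getD_eq_getElem?_getD,
          hlt, show k < S.length by omega,
          show k < R.length by omega]

-- (max,+) Option algebra
lemma pvMaxO_comm (a b : Option Int) : pvMaxO a b = pvMaxO b a := by
  cases a <;> cases b <;> simp [pvMaxO, max_comm]

lemma pvMaxO_assoc (a b c : Option Int) : pvMaxO (pvMaxO a b) c = pvMaxO a (pvMaxO b c) := by
  cases a <;> cases b <;> cases c <;> simp [pvMaxO, max_assoc]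

lemma pvMaxO_left_comm (a b c : Option Int) : pvMaxO a (pvMaxO b c) = pvMaxO b (pvMaxO a c) := by
  rw [← pvMaxO_assoc, pvMaxO_comm a b, pvMaxO_assoc]

lemma pvAddO_assoc (a b c : Option Int) : pvAddO (pvAddO a b) c = pvAddO a (pvAddO b c) := by
  cases a <;> cases b <;> cases c <;> simp [pvAddO, add_assoc]

lemma pvAddO_maxO (a b c : Option Int) :
    pvAddO a (pvMaxO b c) = pvMaxO (pvAddO a b) (pvAddO a c) := by
  cases a <;> cases b <;> cases c <;>
    simp [pvAddO, pvMaxO, Int.max_def] <;> split_ifs <;> omega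

lemma pvMaxO_addO (a b c : Option Int) :
    pvAddO (pvMaxO a b) c = pvMaxO (pvAddO a c) (pvAddO b c) := by
  cases a <;> cases b <;> cases c <;>
    simp [pvAddO, pvMaxO, Int.max_def] <;> split_ifs <;> omega

-- vector-matrix compatibility with the matrix product
lemma pvMaxO_swap (a b c d : Option Int) :
    pvMaxO (pvMaxO a b) (pvMaxO c d) = pvMaxO (pvMaxO a c) (pvMaxO b d) := by
  simp only [pvMaxO_assoc]
  rw [pvMaxO_left_comm b c d]

lemma pvRow_mul (v : Option Int × Option Int)
    (m n : Option Int × Option Int × Option Int × Option Int) :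
    pvRow v (pvMatMul m n) = pvRow (pvRow v m) n := by
  obtain ⟨v1, v2⟩ := v
  obtain ⟨a, b, c, d⟩ := m
  obtain ⟨e, f, g, h⟩ := n
  simp only [pvRow, pvMatMul, pvAddO_maxO, pvMaxO_addO, ← pvAddO_assoc]
  simp only [Prod.mk.injEq]
  exact ⟨pvMaxO_swap _ _ _ _, pvMaxO_swap _ _ _ _⟩

lemma pvProdSeg_row (mats : List (Option Int × Option Int × Option Int × Option Int)) :
    ∀ (fuel lo hi : Nat) (v : Option Int × Option Int), lo < hi → hi ≤ mats.length →
      hi - lo ≤ fuel →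
      pvRow v (pvProdSeg mats fuel lo hi) = ((mats.drop lo).take (hi - lo)).foldl pvRow v := by
  intro fuel
  induction fuel with
  | zero => intro lo hi v h1 _ h3; omega
  | succ m ih =>
      intro lo hi v h1 h2 h3
      simp only [pvProdSeg]
      by_cases hbase : hi ≤ lo + 1
      · have hhi : hi = lo + 1 := by omega
        subst hhi
        simp only [hbase, if_pos]
        have hlo : lo < mats.length := by omega
        have hdrop : mats.drop lo = mats[lo] :: mats.drop (lo + 1) :=
          List.drop_eq_getElem_cons hlo
        have htake : List.take 1 (List.drop lo mats) = [mats[lo]] := by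
          rw [hdrop, List.take_succ_cons, List.take_zero]
        rw [show lo + 1 - lo = 1 from by omega, htake, List.foldl_cons, List.foldl_nil]
        simp [PySem.List.pyGetD_natCast, List.getD_eq_getElem?_getD, hlo]
      · simp only [hbase, if_neg, not_false_iff]
        set mid := (lo + hi) / 2 with hmid
        have hm1 : lo < mid := by omega
        have hm2 : mid < hi := by omega
        rw [pvRow_mul, ih lo mid v hm1 (by omega) (by omega),
          ih mid hi _ hm2 h2 (by omega)]
        rw [← List.foldl_append]
        congr 1
        rw [show hi - lo = (mid - lo) + (hi - mid) from by omega, List.take_add,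
          List.drop_drop, show lo + (mid - lo) = mid from by omega]

-- invariant tying A's 3-state to B's 2-vector:
-- v = (vg, some t), t = max b c, and vg = some a or (vg = none with a ≤ t)
lemma pvInv : ∀ (G S R : List Int) (a b c t : Int) (vg : Option Int),
    (vg = some a ∨ (vg = none ∧ a ≤ t)) → t = max b c →
    pvMaxO ((pvMatList G S R).foldl pvRow (vg, some t)).1
      ((pvMatList G S R).foldl pvRow (vg, some t)).2
      = some (max (pvFwd G S R (a, b, c)).1
          (max (pvFwd G S R (a, b, c)).2.1 (pvFwd G S R (a, b, c)).2.2)) := by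
  intro G
  induction G with
  | nil =>
      intro S R a b c t vg hv ht
      simp only [pvMatList, pvFwd, List.foldl_nil]
      rcases hv with h | ⟨h, hle⟩ <;> subst h <;> simp [pvMaxO] <;> omega
  | cons g G' ih =>
      intro S R a b c t vg hv ht
      cases S with
      | nil =>
          simp only [pvMatList, pvFwd, List.foldl_nil]
          rcases hv with h | ⟨h, hle⟩ <;> subst h <;> simp [pvMaxO] <;> omega
      | cons s S' =>
        cases R with
        | nil =>
            simp only [pvMatList, pvFwd, List.foldl_nil]
            rcases hv with h | ⟨h, hle⟩ <;> subst h <;> simp [pvMaxO] <;> omega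
        | cons r R' =>
            simp only [pvMatList, pvFwd, List.foldl_cons]
            have hstep : pvRow (vg, some t) (none, some (max s r), some g, some (max s r))
                = (some (max b c + g), some (max a (max b c) + max s r)) := by
              rcases hv with h | ⟨h, hle⟩ <;> subst h <;>
                simp [pvRow, pvAddO, pvMaxO, ht] <;> omega
            rw [hstep]
            rw [ih S' R' (max b c + g) (max a (max b c) + s) (max a (max b c) + r)
              (max a (max b c) + max s r) _ (Or.inl rfl) (by omega)]

lemma pvMatList_length (G S R : List Int) (hS : G.length ≤ S.length)
    (hR : G.length ≤ R.length) : (pvMatList G S R).length = G.length := by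
  induction G generalizing S R with
  | nil => simp [pvMatList]
  | cons g G' ih =>
      cases S with
      | nil => simp at hS
      | cons s S' =>
        cases R with
        | nil => simp at hR
        | cons r R' =>
            simp only [pvMatList, List.length_cons]
            rw [ih S' R' (by simpa using hS) (by simpa using hR)]

-- ===== VERDICT (by name: the statement is the Claim_ definition above) =====
theorem max_activity_happiness_spec : Claim_equal_max_activity_happiness := by
  intro G S R _hDom hPre
  obtain ⟨hS, hR⟩ := hPre
  unfold Spec_max_activity_happiness max_activity_happiness max_activity_happiness_alt
  have hA := pvFoldA G S R hS hR G.length 0 (0, 0, 0) (by omega) (by omega)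
  simp only [Nat.cast_zero] at hA
  by_cases hG : G = []
  · subst hG
    rw [show ((List.length ([] : List Int)) : Int) = 0 from by simp,
      PySem.List.pyRange_one_eq_nil (by omega)]
    simp
  · simp only [hG, if_neg, not_false_iff]
    have hB := pvFoldB G S R hS hR G.length 0 (by omega) (by omega)
    simp only [Nat.cast_zero] at hB
    simp only [hB, List.drop_zero] at *
    have hlen : (pvMatList G S R).length = G.length := pvMatList_length G S R hS hR
    have hpos : 0 < G.length := by
      cases G with | nil => exact absurd rfl hG | cons _ _ => simp
    have hrow := pvProdSeg_row (pvMatList G S R) G.length 0 G.length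
      ((none : Option Int), some 0) hpos (by omega) (by omega)
    simp only [List.drop_zero, Nat.sub_zero, List.take_of_length_le (le_of_eq hlen)] at hrow
    -- (p10, p11) = pvRow (none, some 0) p
    have hp : ∀ p : Option Int × Option Int × Option Int × Option Int,
        pvRow ((none : Option Int), some 0) p = (p.2.2.1, p.2.2.2) := by
      intro p
      obtain ⟨a, b, c, d⟩ := p
      cases c <;> cases d <;> simp [pvRow, pvAddO, pvMaxO]
    have hinv := pvInv G S R 0 0 0 0 none (Or.inr ⟨rfl, le_refl _⟩) (by omega)
    rw [hA]
    have := hp (pvProdSeg (pvMatList G S R) G.length 0 G.length)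
    rw [show (pvProdSeg (pvMatList G S R) G.length 0 G.length).2.2.1
          = (pvRow ((none : Option Int), some 0) (pvProdSeg (pvMatList G S R) G.length 0 G.length)).1
        from by rw [this],
        show (pvProdSeg (pvMatList G S R) G.length 0 G.length).2.2.2
          = (pvRow ((none : Option Int), some 0) (pvProdSeg (pvMatList G S R) G.length 0 G.length)).2
        from by rw [this]]
    rw [hrow, hinv]
    simp
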